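-- pv_equiv track=rewrite | github.com/CSwigg/oviz | oviz/app.py | _overlay_indices
-- ===== SOURCE A (Python) =====
-- FOOTPRINT_CONE_NAME = "__oviz_sky_footprint_cone__"
--
-- FOOTPRINT_RIM_NAME = "__oviz_sky_footprint_rim__"
--
-- def _overlay_indices(data: list):
--     cone_idx = None
--     rim_idx = None
--     if not isinstance(data, list):
--         return cone_idx, rim_idx
--     for idx, trace in enumerate(data):
--         if not isinstance(trace, dict):
--             continue
--         trace_name = trace.get("name")
--         if trace_name == FOOTPRINT_CONE_NAME:
--             cone_idx = idx
--         elif trace_name == FOOTPRINT_RIM_NAME: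
--             rim_idx = idx
--     return cone_idx, rim_idx
-- ===== SOURCE B (Python) =====
-- FOOTPRINT_CONE_NAME = "__oviz_sky_footprint_cone__"
--
-- FOOTPRINT_RIM_NAME = "__oviz_sky_footprint_rim__"
--
-- def _overlay_indices(data: list):
--     cone_idx = None
--     rim_idx = None
--     if not isinstance(data, list):
--         return cone_idx, rim_idx
--     # scan backwards: first match from the end == last match from the front
--     for idx, trace in reversed(list(enumerate(data))):
--         if not isinstance(trace, dict):
--             continue
--         name = trace.get("name")
--         if name == FOOTPRINT_CONE_NAME and cone_idx is None:
--             cone_idx = idx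
--         elif name == FOOTPRINT_RIM_NAME and rim_idx is None:
--             rim_idx = idx
--         if cone_idx is not None and rim_idx is not None:
--             break
--     return cone_idx, rim_idx
-- ===== Notes on version B (the rewrite author's own statement) =====
-- stated objective: alternative
-- what changed: B scans the list from the end, keeping the first cone/rim name it meets (which equals A's last-from-the-front match) and breaking as soon as both indices are found, instead of A's full forward pass that keeps overwriting.
import Mathlib
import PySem

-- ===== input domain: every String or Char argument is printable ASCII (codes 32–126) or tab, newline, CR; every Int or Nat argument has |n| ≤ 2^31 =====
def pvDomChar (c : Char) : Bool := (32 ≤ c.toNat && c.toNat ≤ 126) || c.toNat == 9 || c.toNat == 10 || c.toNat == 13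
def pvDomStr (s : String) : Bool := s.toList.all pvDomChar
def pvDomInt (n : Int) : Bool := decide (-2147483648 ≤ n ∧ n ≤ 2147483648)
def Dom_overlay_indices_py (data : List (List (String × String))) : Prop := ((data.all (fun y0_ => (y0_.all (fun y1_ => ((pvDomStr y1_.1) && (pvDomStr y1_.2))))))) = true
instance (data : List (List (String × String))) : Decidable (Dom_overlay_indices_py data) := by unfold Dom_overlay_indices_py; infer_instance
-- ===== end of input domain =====

-- B changes the traversal (backward scan with early break instead of A's overwriting forward pass); same cost, no speed claim.

def pvFootprintCone : String := "__oviz_sky_footprint_cone__"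
def pvFootprintRim : String := "__oviz_sky_footprint_rim__"

-- ===== PORT A =====
-- A's loop body: overwrite cone_idx / rim_idx on every match (the `isinstance` checks
-- are vacuous under the type convention: data is a list of dicts).
def pvStepA (s : Option Int × Option Int) (p : Int × List (String × String)) :
    Option Int × Option Int :=
  let trace_name := (PySem.Dict.mk p.2).get? "name"
  if trace_name = some pvFootprintCone then (some p.1, s.2)
  else if trace_name = some pvFootprintRim then (s.1, some p.1)
  else s

def overlay_indices_py (data : List (List (String × String))) : Option Int × Option Int :=
  (PySem.List.enumerate data).foldl pvStepA (none, none)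

-- ===== PORT B =====
-- B's loop body: set an index only if it is still None (first match from the end wins).
def pvStepB (s : Option Int × Option Int) (p : Int × List (String × String)) :
    Option Int × Option Int :=
  let name := (PySem.Dict.mk p.2).get? "name"
  if name = some pvFootprintCone ∧ s.1 = none then (some p.1, s.2)
  else if name = some pvFootprintRim ∧ s.2 = none then (s.1, some p.1)
  else s

-- backward loop with the early `break` once both indices are found
def pvScanBack : List (Int × List (String × String)) → Option Int → Option Int →
    Option Int × Option Int
  | [], c, r => (c, r)
  | p :: rest, c, r =>
    let s := pvStepB (c, r) p
    if s.1 ≠ none ∧ s.2 ≠ none then s else pvScanBack rest s.1 s.2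

def overlay_indices_py_alt (data : List (List (String × String))) : Option Int × Option Int :=
  pvScanBack (PySem.List.enumerate data).reverse none none

-- ===== PRECONDITION & SPEC =====
def Spec_overlay_indices_py (data : List (List (String × String))) (out : Option Int × Option Int) : Prop := out = overlay_indices_py_alt data
instance (data : List (List (String × String))) (out : Option Int × Option Int) : Decidable (Spec_overlay_indices_py data out) := by unfold Spec_overlay_indices_py; infer_instance

-- ===== CLAIM (what is proved, stated in full; the proofs are below) =====
def Claim_equal_overlay_indices_py : Prop := ∀ (data : List (List (String × String))), Dom_overlay_indices_py data → Spec_overlay_indices_py data (overlay_indices_py data)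

-- ===== LEMMAS AND PROOFS =====

-- "first some" merge: the result of either loop started from (c, r) is the result
-- from (none, none) merged with the start values with the appropriate priority.
def pvOr (a b : Option Int) : Option Int :=
  match a with
  | some x => some x
  | none => b

-- equation lemmas for the ports' loop bodies
theorem pvScanBack_nil (c r : Option Int) : pvScanBack [] c r = (c, r) := rfl

theorem pvScanBack_cons (p : Int × List (String × String))
    (rest : List (Int × List (String × String))) (c r : Option Int) :
    pvScanBack (p :: rest) c r =
      if (pvStepB (c, r) p).1 ≠ none ∧ (pvStepB (c, r) p).2 ≠ none then pvStepB (c, r) p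
      else pvScanBack rest (pvStepB (c, r) p).1 (pvStepB (c, r) p).2 := rfl

theorem pvStepA_cone (c r : Option Int) (p : Int × List (String × String))
    (h : (PySem.Dict.mk p.2).get? "name" = some pvFootprintCone) :
    pvStepA (c, r) p = (some p.1, r) := by simp [pvStepA, h]

theorem pvStepA_rim (c r : Option Int) (p : Int × List (String × String))
    (h1 : ¬ (PySem.Dict.mk p.2).get? "name" = some pvFootprintCone)
    (h2 : (PySem.Dict.mk p.2).get? "name" = some pvFootprintRim) :
    pvStepA (c, r) p = (c, some p.1) := by
  have hne : ¬ pvFootprintRim = pvFootprintCone := by decide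
  simp [pvStepA, h1, h2, hne]

theorem pvStepA_other (c r : Option Int) (p : Int × List (String × String))
    (h1 : ¬ (PySem.Dict.mk p.2).get? "name" = some pvFootprintCone)
    (h2 : ¬ (PySem.Dict.mk p.2).get? "name" = some pvFootprintRim) :
    pvStepA (c, r) p = (c, r) := by simp [pvStepA, h1, h2]

-- once both indices are set, B's step does nothing
theorem pvStepB_sat (c r : Option Int) (p : Int × List (String × String))
    (hc : c ≠ none) (hr : r ≠ none) : pvStepB (c, r) p = (c, r) := by
  unfold pvStepB
  simp only
  rw [if_neg (by simp [hc]), if_neg (by simp [hr])]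

-- processing a trailing element commutes with the rest of the backward scan
theorem pvScanBack_append (M : List (Int × List (String × String)))
    (p : Int × List (String × String)) :
    ∀ c r, pvScanBack (M ++ [p]) c r = pvStepB (pvScanBack M c r) p := by
  induction M with
  | nil =>
    intro c r
    rw [List.nil_append, pvScanBack_cons, pvScanBack_nil, pvScanBack_nil]
    by_cases h : (pvStepB (c, r) p).1 ≠ none ∧ (pvStepB (c, r) p).2 ≠ none
    · rw [if_pos h]
    · rw [if_neg h]
  | cons q M ih =>
    intro c r
    rw [List.cons_append, pvScanBack_cons, pvScanBack_cons]
    by_cases h : (pvStepB (c, r) q).1 ≠ none ∧ (pvStepB (c, r) q).2 ≠ none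
    · rw [if_pos h, if_pos h]
      exact (pvStepB_sat _ _ p h.1 h.2).symm
    · rw [if_neg h, if_neg h, ih]

-- A's foldl from an arbitrary start state, in terms of the start from (none, none)
theorem pvFoldA_init (L : List (Int × List (String × String))) :
    ∀ c r, L.foldl pvStepA (c, r) =
      (pvOr (L.foldl pvStepA (none, none)).1 c, pvOr (L.foldl pvStepA (none, none)).2 r) := by
  induction L with
  | nil => intro c r; simp [pvOr]
  | cons p L ih =>
    intro c r
    simp only [List.foldl_cons]
    by_cases h1 : (PySem.Dict.mk p.2).get? "name" = some pvFootprintCone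
    · rw [pvStepA_cone c r p h1, pvStepA_cone none none p h1]
      rw [ih (some p.1) r, ih (some p.1) (none : Option Int)]
      obtain ⟨f1, f2⟩ := L.foldl pvStepA (none, none)
      cases f1 <;> cases f2 <;> simp [pvOr]
    · by_cases h2 : (PySem.Dict.mk p.2).get? "name" = some pvFootprintRim
      · rw [pvStepA_rim c r p h1 h2, pvStepA_rim none none p h1 h2]
        rw [ih c (some p.1), ih (none : Option Int) (some p.1)]
        obtain ⟨f1, f2⟩ := L.foldl pvStepA (none, none)
        cases f1 <;> cases f2 <;> simp [pvOr]
      · rw [pvStepA_other c r p h1 h2, pvStepA_other none none p h1 h2]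
        exact ih c r

-- B's step applied to an accumulated state equals A's merge of the new element
theorem pvStepB_merge (qc qr : Option Int) (p : Int × List (String × String)) :
    pvStepB (qc, qr) p =
      (pvOr qc (pvStepA (none, none) p).1, pvOr qr (pvStepA (none, none) p).2) := by
  have hne : ¬ pvFootprintCone = pvFootprintRim := by decide
  have hne' : ¬ pvFootprintRim = pvFootprintCone := by decide
  by_cases h1 : (PySem.Dict.mk p.2).get? "name" = some pvFootprintCone
  · have h2 : ¬ (PySem.Dict.mk p.2).get? "name" = some pvFootprintRim := by
      rw [h1]; simp [hne]
    cases qc <;> cases qr <;> simp [pvStepB, pvStepA, pvOr, h1, h2, hne]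
  · by_cases h2 : (PySem.Dict.mk p.2).get? "name" = some pvFootprintRim
    · cases qc <;> cases qr <;> simp [pvStepB, pvStepA, pvOr, h1, h2, hne']
    · cases qc <;> cases qr <;> simp [pvStepB, pvStepA, pvOr, h1, h2]

-- main: the backward scan from (none, none) computes A's forward fold
theorem pvScan_eq_fold (L : List (Int × List (String × String))) :
    pvScanBack L.reverse none none = L.foldl pvStepA (none, none) := by
  induction L with
  | nil => rfl
  | cons p L ih =>
    rw [List.reverse_cons, pvScanBack_append, ih, List.foldl_cons]
    rw [pvFoldA_init L (pvStepA (none, none) p).1 (pvStepA (none, none) p).2]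
    rw [pvStepB_merge]

-- ===== VERDICT (by name: the statement is the Claim_ definition above) =====
theorem overlay_indices_py_spec : Claim_equal_overlay_indices_py := by
  intro data _
  unfold Spec_overlay_indices_py overlay_indices_py overlay_indices_py_alt
  exact (pvScan_eq_fold _).symm
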